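-- pv_equiv track=rewrite | github.com/beatrice-b-m/panoptic | session_manager.py | _merge_pane_commands
-- ===== SOURCE A (Python) =====
-- def _merge_pane_commands(
--     spec_commands: list[str],
--     overlay_commands: list[str] | None,
--     total_panes: int,
-- ) -> list[str]:
--     """Merge layout-spec default commands with explicit overlay commands.
--
--     For each pane index, the overlay command takes precedence if non-empty;
--     otherwise the spec-embedded command (if any) is used.
--     """
--     result: list[str] = []
--     overlay = overlay_commands or []
--     for i in range(total_panes):
--         ov = overlay[i] if i < len(overlay) else ''
--         sp = spec_commands[i] if i < len(spec_commands) else ''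
--         result.append(ov if ov else sp)
--     return result
-- ===== SOURCE B (Python) =====
-- def _merge_pane_commands(
--     spec_commands: list[str],
--     overlay_commands: list[str] | None,
--     total_panes: int,
-- ) -> list[str]:
--     """Merge layout-spec default commands with explicit overlay commands.
--
--     Defaults-then-overrides decomposition: build the spec defaults first,
--     then apply non-empty overlay entries on top.
--     """
--     overlay = overlay_commands or []
--     result = [spec_commands[i] if i < len(spec_commands) else ''
--               for i in range(total_panes)]
--     for i in range(min(len(overlay), total_panes)):
--         if overlay[i]:
--             result[i] = overlay[i]
--     return result
-- ===== Notes on version B (the rewrite author's own statement) =====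
-- stated objective: alternative
-- what changed: Replaces the single loop that decides each pane with a ternary and appends, by the defaults-then-overrides idiom: first build the whole result as spec defaults padded to total_panes, then a second, differently-bounded pass mutates entries in place where the overlay is non-empty.
import Mathlib
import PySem

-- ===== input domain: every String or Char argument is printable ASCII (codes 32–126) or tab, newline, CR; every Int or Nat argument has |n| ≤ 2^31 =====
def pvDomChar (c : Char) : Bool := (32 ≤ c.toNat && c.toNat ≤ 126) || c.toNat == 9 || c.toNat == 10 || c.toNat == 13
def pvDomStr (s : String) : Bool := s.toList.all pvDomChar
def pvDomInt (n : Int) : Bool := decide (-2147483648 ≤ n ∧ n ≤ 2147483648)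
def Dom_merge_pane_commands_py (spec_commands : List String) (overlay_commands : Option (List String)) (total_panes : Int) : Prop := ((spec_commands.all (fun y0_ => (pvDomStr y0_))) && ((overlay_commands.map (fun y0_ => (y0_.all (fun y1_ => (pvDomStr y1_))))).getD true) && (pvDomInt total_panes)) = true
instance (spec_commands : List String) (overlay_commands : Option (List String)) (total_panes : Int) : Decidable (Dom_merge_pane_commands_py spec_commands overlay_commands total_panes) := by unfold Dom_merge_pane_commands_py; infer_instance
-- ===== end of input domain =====

-- B uses the defaults-then-overrides decomposition (build the spec defaults, then overwrite in place);
-- same cost, same return value as A on every input.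

-- ===== PORT A =====
-- single loop: for each pane index, append (overlay value if non-empty else spec value)
def merge_pane_commands_py (spec_commands : List String) (overlay_commands : Option (List String)) (total_panes : Int) : List String :=
  let overlay := overlay_commands.getD []   -- `overlay_commands or []` (a `some []` already yields [])
  (PySem.List.pyRange 0 total_panes 1).foldl
    (fun result i =>
      let ov := if i < (overlay.length : Int) then overlay.getD i.toNat "" else ""
      let sp := if i < (spec_commands.length : Int) then spec_commands.getD i.toNat "" else ""
      result ++ [if ov ≠ "" then ov else sp]) []

-- ===== PORT B =====
-- pass 1: spec defaults padded to total_panes; pass 2: in-place overrides where the overlay entry is non-empty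
def merge_pane_commands_py_alt (spec_commands : List String) (overlay_commands : Option (List String)) (total_panes : Int) : List String :=
  let overlay := overlay_commands.getD []   -- `overlay_commands or []`
  let result := (PySem.List.pyRange 0 total_panes 1).map
    (fun i => if i < (spec_commands.length : Int) then spec_commands.getD i.toNat "" else "")
  (PySem.List.pyRange 0 (min (overlay.length : Int) total_panes) 1).foldl
    (fun result i =>
      if overlay.getD i.toNat "" ≠ "" then result.set i.toNat (overlay.getD i.toNat "") else result)
    result

-- ===== PRECONDITION & SPEC =====
def Spec_merge_pane_commands_py (spec_commands : List String) (overlay_commands : Option (List String)) (total_panes : Int) (out : List String) : Prop := out = merge_pane_commands_py_alt spec_commands overlay_commands total_panes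
instance (spec_commands : List String) (overlay_commands : Option (List String)) (total_panes : Int) (out : List String) : Decidable (Spec_merge_pane_commands_py spec_commands overlay_commands total_panes out) := by unfold Spec_merge_pane_commands_py; infer_instance

-- ===== CLAIM (what is proved, stated in full; the proofs are below) =====
def Claim_equal_merge_pane_commands_py : Prop := ∀ (spec_commands : List String) (overlay_commands : Option (List String)) (total_panes : Int), Dom_merge_pane_commands_py spec_commands overlay_commands total_panes → Spec_merge_pane_commands_py spec_commands overlay_commands total_panes (merge_pane_commands_py spec_commands overlay_commands total_panes)

-- ===== LEMMAS AND PROOFS =====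

-- A's append-loop is a map over the range.
theorem foldl_append_singleton (f : Int → String) :
    ∀ (l : List Int) (acc : List String),
      l.foldl (fun r i => r ++ [f i]) acc = acc ++ l.map f := by
  intro l
  induction l with
  | nil => simp
  | cons x xs ih => intro acc; simp [List.foldl_cons, ih]

-- B's override fold preserves the length.
theorem length_setfold (ov : List String) :
    ∀ (idxs : List Int) (base : List String),
      (idxs.foldl (fun r i =>
        if ov.getD i.toNat "" ≠ "" then r.set i.toNat (ov.getD i.toNat "") else r) base).length
      = base.length := by
  intro idxs
  induction idxs with
  | nil => intro base; rfl
  | cons x xs ih =>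
    intro base
    rw [List.foldl_cons]
    by_cases h : ov.getD x.toNat "" ≠ ""
    · rw [if_pos h, ih, List.length_set]
    · rw [if_neg h, ih]

-- Elementwise description of B's override fold (the written value depends only on the index,
-- so duplicates in the index list are harmless).
theorem getElem?_setfold (ov : List String) :
    ∀ (idxs : List Int), (∀ i ∈ idxs, 0 ≤ i) →
      ∀ (base : List String) (j : Nat), j < base.length →
      (idxs.foldl (fun r i =>
        if ov.getD i.toNat "" ≠ "" then r.set i.toNat (ov.getD i.toNat "") else r) base)[j]?
      = if ((j : Int) ∈ idxs ∧ ov.getD j "" ≠ "") then some (ov.getD j "") else base[j]? := by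
  intro idxs
  induction idxs with
  | nil => intro _ base j _; simp
  | cons x xs ih =>
    intro hpos base j hj
    have hx : 0 ≤ x := hpos x (by simp)
    rw [List.foldl_cons]
    by_cases hxe : ov.getD x.toNat "" ≠ ""
    · rw [if_pos hxe,
        ih (fun i hi => hpos i (by simp [hi])) _ j (by rw [List.length_set]; exact hj),
        List.getElem?_set]
      by_cases hmem : ((j : Int) ∈ xs ∧ ov.getD j "" ≠ "")
      · rw [if_pos hmem, if_pos ⟨List.mem_cons_of_mem _ hmem.1, hmem.2⟩]
      · rw [if_neg hmem]
        by_cases hxj : x.toNat = j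
        · have hj' : ov.getD j "" = ov.getD x.toNat "" := by rw [hxj]
          have hcond : ((j : Int) ∈ (x :: xs) ∧ ov.getD j "" ≠ "") :=
            ⟨List.mem_cons.mpr (Or.inl (by omega)), by rw [hj']; exact hxe⟩
          rw [if_pos hxj, if_pos (hxj ▸ hj), if_pos hcond, hj']
        · have hcond : ¬ ((j : Int) ∈ (x :: xs) ∧ ov.getD j "" ≠ "") := by
            intro h
            rcases List.mem_cons.mp h.1 with heq | hm
            · exact hxj (by omega)
            · exact hmem ⟨hm, h.2⟩
          rw [if_neg hxj, if_neg hcond]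
    · rw [if_neg hxe, ih (fun i hi => hpos i (by simp [hi])) base j hj]
      push_neg at hxe
      by_cases hmem : ((j : Int) ∈ xs ∧ ov.getD j "" ≠ "")
      · rw [if_pos hmem, if_pos ⟨List.mem_cons_of_mem _ hmem.1, hmem.2⟩]
      · have hcond : ¬ ((j : Int) ∈ (x :: xs) ∧ ov.getD j "" ≠ "") := by
          intro h
          rcases List.mem_cons.mp h.1 with heq | hm
          · exact h.2 (by rw [show j = x.toNat by omega]; exact hxe)
          · exact hmem ⟨hm, h.2⟩
        rw [if_neg hmem, if_neg hcond]

-- ===== VERDICT (by name: the statement is the Claim_ definition above) =====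
theorem merge_pane_commands_py_spec : Claim_equal_merge_pane_commands_py := by
  intro spec overlay_commands tp _
  unfold Spec_merge_pane_commands_py
  simp only [merge_pane_commands_py, merge_pane_commands_py_alt]
  set ov : List String := overlay_commands.getD [] with hov
  rw [foldl_append_singleton, List.nil_append]
  apply List.ext_getElem?
  intro j
  by_cases hjlen : j < (PySem.List.pyRange 0 tp 1).length
  · have hjtp : (j : Int) < tp := by
      rw [PySem.List.length_pyRange_one] at hjlen; omega
    have hjlen' : j < ((PySem.List.pyRange 0 tp 1).map
        (fun i => if i < (spec.length : Int) then spec.getD i.toNat "" else "")).length := by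
      simpa using hjlen
    rw [getElem?_setfold ov _ (fun i hi => ((PySem.List.mem_pyRange_one).mp hi).1) _ j hjlen']
    simp only [List.getElem?_map, PySem.List.getElem?_pyRange_one, PySem.List.mem_pyRange_one]
    rw [if_pos (show j < (tp - 0).toNat by omega)]
    simp only [Option.map_some, zero_add, Int.toNat_natCast]
    by_cases hlt : (j : Int) < (ov.length : Int)
    · by_cases hne : ov[j]?.getD "" = ""
      · simp [hlt, hne]
      · simp [hlt, hne, lt_min_iff, hjtp]
    · have hmin : ¬ ((j : Int) < min (ov.length : Int) tp) := by omega
      simp [hlt, hmin]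
  · have h1 : ((PySem.List.pyRange 0 tp 1).map
        (fun i =>
          let ovv := if i < (ov.length : Int) then ov.getD i.toNat "" else ""
          let sp := if i < (spec.length : Int) then spec.getD i.toNat "" else ""
          if ovv ≠ "" then ovv else sp))[j]? = none := by
      rw [List.getElem?_eq_none_iff]; simpa using Nat.le_of_not_lt hjlen
    rw [h1]
    symm
    rw [List.getElem?_eq_none_iff, length_setfold]
    simpa using Nat.le_of_not_lt hjlen
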